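-- pv_equiv track=rewrite | github.com/vonnan/Leetcode | maximum-number-of-non-overlapping-substrings/maximum-number-of-non-overlapping-substrings.py | maxNumOfSubstrings
-- ===== SOURCE A (Python) =====
-- from typing import List
--
-- def maxNumOfSubstrings(s: str) -> List[str]:
--
--     char_set = set(s)
--     n, m = len(s), len(char_set)
--
--     dic = {c: (s.rindex(c), s.index(c)) for c in char_set}
--
--     for char in dic:
--         right, left = dic[char]
--         right_, left_ = -1, -1
--         while right_ != right or left_ != left:
--             right_, left_ = right, left
--             left = min(dic[c][1] for c in set(s[left: right + 1]))
--             right = max(dic[c][0] for c in set(s[left: right + 1]))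
--         dic[char] =(right, left)
--
--     curr = 0
--     res = []
--
--     for r, l in sorted(dic.values()):
--
--         if l >=curr:
--             res.append(s[l:r+1])
--         curr = r
--
--
--     return res
-- ===== SOURCE B (Python) =====
-- # B: precompute first/last occurrence per char in one pass, expand each char's
-- # interval with a single left-to-right scan (restart on left extension), then
-- # sort intervals and greedily select -- instead of A's repeated global
-- # min/max-over-slice fixpoint recomputation with dict mutation.
-- def maxNumOfSubstrings(s):
--     first = {}
--     last = {}
--     for i, c in enumerate(s):
--         if c not in first:
--             first[c] = i
--         last[c] = i
--
--     def closure(c):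
--         l, r = first[c], last[c]
--         i = l
--         while i <= r:
--             ch = s[i]
--             if first[ch] < l:
--                 l = first[ch]
--                 i = l
--             else:
--                 if last[ch] > r:
--                     r = last[ch]
--                 i += 1
--         return (r, l)
--
--     curr = 0
--     res = []
--     for r, l in sorted(closure(c) for c in first):
--         if l >= curr:
--             res.append(s[l:r+1])
--         curr = r
--     return res
-- ===== Notes on version B (the rewrite author's own statement) =====
-- stated objective: alternative
-- what changed: A recomputes min/max of per-char spans over set(s[l:r+1]) slices to a fixpoint for every character while mutating the dict; B builds first/last occurrence tables in one enumerate pass and expands each character's interval with a single left-to-right scan (restarting only when the left end moves), then sorts the intervals and greedily selects exactly as before.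
import Mathlib
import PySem

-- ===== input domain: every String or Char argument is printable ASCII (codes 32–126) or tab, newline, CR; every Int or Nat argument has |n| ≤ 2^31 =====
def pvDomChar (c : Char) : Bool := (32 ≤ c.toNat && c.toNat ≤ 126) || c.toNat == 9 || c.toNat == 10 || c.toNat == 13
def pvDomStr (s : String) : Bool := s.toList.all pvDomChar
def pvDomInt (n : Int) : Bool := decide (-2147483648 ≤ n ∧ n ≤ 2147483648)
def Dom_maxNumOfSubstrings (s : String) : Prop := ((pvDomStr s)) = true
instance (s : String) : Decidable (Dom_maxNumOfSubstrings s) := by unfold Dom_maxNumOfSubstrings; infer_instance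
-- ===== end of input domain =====

-- B replaces A's repeated min/max-over-slice fixpoint recomputation (with dict mutation)
-- by one first/last-occurrence pass plus a single extending scan per character
-- (objective: alternative algorithm of similar measured cost).

-- ===== PORT A =====
-- s.index(c) (exact for c present in xs, the only way A calls it)
def pvFirstIdx (xs : List Char) (c : Char) : Int :=
  (((PySem.List.index? xs c).getD 0 : Nat) : Int)
-- s.rindex(c) via the reversed list (exact for c present in xs, the only way A calls it)
def pvLastIdx (xs : List Char) (c : Char) : Int :=
  (xs.length : Int) - 1 - (((PySem.List.index? xs.reverse c).getD 0 : Nat) : Int)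

-- min(dic[c][1] for c in set(s[left:right+1]))
def pvWinMin (xs : List Char) (d : PySem.Dict Char (Int × Int)) (left right : Int) : Int :=
  (PySem.List.min? ((PySem.Set.ofList (PySem.List.slice xs (some left) (some (right + 1)))).map
      (fun c => (d.getD c (0, 0)).2)) (fun x => x)).getD 0
-- max(dic[c][0] for c in set(s[left:right+1]))
def pvWinMax (xs : List Char) (d : PySem.Dict Char (Int × Int)) (left right : Int) : Int :=
  (PySem.List.max? ((PySem.Set.ofList (PySem.List.slice xs (some left) (some (right + 1)))).map
      (fun c => (d.getD c (0, 0)).1)) (fun x => x)).getD 0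

-- the 'while right_ != right or left_ != left' loop; fuel only makes it total
def pvCloseA (xs : List Char) (d : PySem.Dict Char (Int × Int)) :
    Nat → Int → Int → Int → Int → Int × Int
  | 0, right, left, _, _ => (right, left)
  | fuel + 1, right, left, right_, left_ =>
    if right_ ≠ right ∨ left_ ≠ left then
      let left' := pvWinMin xs d left right
      let right' := pvWinMax xs d left' right
      pvCloseA xs d fuel right' left' right left
    else (right, left)

def maxNumOfSubstrings (s : String) : List String :=
  let xs := s.toList
  let charSet : PySem.Set Char := PySem.Set.ofList xs
  let dic0 : PySem.Dict Char (Int × Int) :=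
    charSet.foldl (fun d c => d.insert c (pvLastIdx xs c, pvFirstIdx xs c)) PySem.Dict.empty
  let dic : PySem.Dict Char (Int × Int) :=
    dic0.keys.foldl (fun d ch =>
      let rl := d.getD ch (0, 0)
      d.insert ch (pvCloseA xs d (2 * xs.length + 4) rl.1 rl.2 (-1) (-1))) dic0
  let vals := PySem.List.sorted2 dic.values (fun p => p.1) (fun p => p.2)
  (vals.foldl (fun (acc : Int × List String) rl =>
      (rl.1, if rl.2 ≥ acc.1 then
          acc.2 ++ [String.ofList (PySem.List.slice xs (some rl.2) (some (rl.1 + 1)))]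
        else acc.2)) ((0 : Int), ([] : List String))).2

-- ===== PORT B =====
-- the single extending scan of Source B's closure(c); indices are Nat (Python's are the
-- same nonnegative ints); the i < xs.length test only makes the scan total (Python
-- would raise IndexError there; unreachable since r stays < len(s))
def pvScanB (xs : List Char) (fd ld : PySem.Dict Char Nat) (l r i : Nat) : Nat × Nat :=
  if _h1 : i ≤ r then
    if h2 : i < xs.length then
      let ch := xs[i]
      let fc := fd.getD ch 0
      if h3 : fc < l then pvScanB xs fd ld fc r fc
      else
        let lc := ld.getD ch 0
        pvScanB xs fd ld l (if r < lc then lc else r) (i + 1)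
    else (r, l)
  else (r, l)
termination_by (l, xs.length - i)
decreasing_by
  · exact Prod.Lex.left _ _ h3
  · exact Prod.Lex.right _ (by omega)

def maxNumOfSubstrings_alt (s : String) : List String :=
  let xs := s.toList
  let fl := xs.zipIdx.foldl
    (fun (p : PySem.Dict Char Nat × PySem.Dict Char Nat) ci =>
      ((if p.1.contains ci.1 then p.1 else p.1.insert ci.1 ci.2), p.2.insert ci.1 ci.2))
    (PySem.Dict.empty, PySem.Dict.empty)
  let ivs : List (Int × Int) := fl.1.keys.map (fun c =>
    let p := pvScanB xs fl.1 fl.2 (fl.1.getD c 0) (fl.2.getD c 0) (fl.1.getD c 0)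
    ((p.1 : Int), (p.2 : Int)))
  let vals := PySem.List.sorted2 ivs (fun p => p.1) (fun p => p.2)
  (vals.foldl (fun (acc : Int × List String) rl =>
      (rl.1, if rl.2 ≥ acc.1 then
          acc.2 ++ [String.ofList (PySem.List.slice xs (some rl.2) (some (rl.1 + 1)))]
        else acc.2)) ((0 : Int), ([] : List String))).2

-- ===== PRECONDITION & SPEC =====
def Spec_maxNumOfSubstrings (s : String) (out : List String) : Prop := out = maxNumOfSubstrings_alt s
instance (s : String) (out : List String) : Decidable (Spec_maxNumOfSubstrings s out) := by unfold Spec_maxNumOfSubstrings; infer_instance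

-- ===== CLAIM (what is proved, stated in full; the proofs are below) =====
def Claim_equal_maxNumOfSubstrings : Prop := ∀ (s : String), Dom_maxNumOfSubstrings s → Spec_maxNumOfSubstrings s (maxNumOfSubstrings s)

-- ===== LEMMAS AND PROOFS =====

def pvFN (xs : List Char) (c : Char) : Nat := (PySem.List.index? xs c).getD 0
def pvLN (xs : List Char) (c : Char) : Nat :=
  xs.length - 1 - (PySem.List.index? xs.reverse c).getD 0

lemma pvFN_spec (xs : List Char) (c : Char) (hc : c ∈ xs) :
    ∃ h : pvFN xs c < xs.length, xs[pvFN xs c] = c ∧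
      ∀ j (hj : j < xs.length), xs[j] = c → pvFN xs c ≤ j := by
  obtain ⟨k, hk⟩ := Option.isSome_iff_exists.mp ((PySem.List.index?_isSome_iff xs c).mpr hc)
  obtain ⟨hlt,heq, hmin⟩ := PySem.List.getElem_of_index?_eq_some hk
  have hfn : pvFN xs c = k := by simp only [pvFN, hk, Option.getD_some]
  rw [hfn]
  refine ⟨hlt, heq, ?_⟩
  intro j hj hje
  by_contra h
  exact hmin j (by omega) hje

lemma pvLN_spec (xs : List Char) (c : Char) (hc : c ∈ xs) :
    ∃ h : pvLN xs c < xs.length, xs[pvLN xs c] = c ∧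
      ∀ j (hj : j < xs.length), xs[j] = c → j ≤ pvLN xs c := by
  have hcr : c ∈ xs.reverse := by simpa using hc
  obtain ⟨k, hk⟩ := Option.isSome_iff_exists.mp ((PySem.List.index?_isSome_iff _ c).mpr hcr)
  obtain ⟨hlt, heq, hmin⟩ := PySem.List.getElem_of_index?_eq_some hk
  rw [List.length_reverse] at hlt
  have hfn : pvLN xs c = xs.length - 1 - k := by simp only [pvLN, hk, Option.getD_some]
  rw [hfn]
  have hget : xs[xs.length - 1 - k]'(by omega) = c := by
    rw [← heq, List.getElem_reverse]
  refine ⟨by omega, hget, ?_⟩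
  intro j hj hje
  by_contra h
  have hidx : xs.reverse[xs.length - 1 - j]'(by simp only [List.length_reverse]; omega) = c := by
    rw [List.getElem_reverse]
    have h2 : xs[xs.length - 1 - (xs.length - 1 - j)]'(by omega) = xs[j] :=
      getElem_congr rfl (by omega) (by omega)
    exact h2.trans hje
  exact hmin (xs.length - 1 - j) (by omega) hidx

def pvClosed (xs : List Char) (l r : Nat) : Prop :=
  ∀ j (hj : j < xs.length), l ≤ j → j ≤ r → l ≤ pvFN xs xs[j] ∧ pvLN xs xs[j] ≤ r

def pvGood (xs : List Char) (c : Char) (p : Nat × Nat) : Prop :=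
  p.2 ≤ pvFN xs c ∧ pvLN xs c ≤ p.1 ∧ pvClosed xs p.2 p.1 ∧
    ∀ L R, pvClosed xs L R → L ≤ pvFN xs c → pvLN xs c ≤ R → L ≤ p.2 ∧ p.1 ≤ R

def pvQ (xs : List Char) (d : PySem.Dict Char (Int × Int)) : Prop :=
  ∀ c ∈ xs, ∃ lc rc : Nat, d.getD c (0, 0) = ((rc : Int), (lc : Int)) ∧
    lc ≤ pvFN xs c ∧ pvLN xs c ≤ rc ∧
    ∀ L R, pvClosed xs L R → L ≤ pvFN xs c → pvLN xs c ≤ R → L ≤ lc ∧ rc ≤ R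

lemma pvFN_le_pvLN (xs : List Char) (c : Char) (hc : c ∈ xs) : pvFN xs c ≤ pvLN xs c := by
  obtain ⟨h1, he1, hmin⟩ := pvFN_spec xs c hc
  obtain ⟨h2, he2, hmax⟩ := pvLN_spec xs c hc
  exact hmin _ h2 he2

lemma pvWin_mem (xs : List Char) (l r : Int) (hl : 0 ≤ l) (hr : l ≤ r) (ch : Char) :
    ch ∈ PySem.Set.ofList (PySem.List.slice xs (some l) (some (r + 1))) ↔
      ∃ j : Nat, ∃ hj : j < xs.length, l ≤ (j : Int) ∧ (j : Int) ≤ r ∧ xs[j] = ch := by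
  rw [PySem.Set.mem_ofList, PySem.List.slice_toNat xs hl (by omega)]
  rw [List.mem_iff_getElem]
  constructor
  · rintro ⟨k, hk, he⟩
    simp only [List.length_take, List.length_drop] at hk
    rw [List.getElem_take, List.getElem_drop] at he
    refine ⟨l.toNat + k, by omega, by omega, by omega, he⟩
  · rintro ⟨j, hj, hlj, hjr, he⟩
    refine ⟨j - l.toNat, ?_, ?_⟩
    · simp only [List.length_take, List.length_drop]
      omega
    · rw [List.getElem_take, List.getElem_drop]
      rw [← he]
      exact getElem_congr rfl (by omega) (by omega)

lemma pvScanB_mono (xs : List Char) (fd ld : PySem.Dict Char Nat)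
    (hf : ∀ c ∈ xs, fd.getD c 0 = pvFN xs c) (hl : ∀ c ∈ xs, ld.getD c 0 = pvLN xs c)
    (L R : Nat) (hLR : pvClosed xs L R) :
    ∀ l r i, L ≤ l → r ≤ R → l ≤ i →
      L ≤ (pvScanB xs fd ld l r i).2 ∧ (pvScanB xs fd ld l r i).1 ≤ R := by
  intro l r i
  induction l, r, i using pvScanB.induct xs fd ld with
  | case1 l r i h1 h2 ch fc h3 ih =>
    intro h4 h5 h6
    rw [pvScanB, dif_pos h1, dif_pos h2, dif_pos h3]
    have hch : xs[i] ∈ xs := List.getElem_mem h2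
    have hcl := hLR i h2 (by omega) (by omega)
    have hfc : fc = pvFN xs xs[i] := hf _ hch
    exact ih (by omega) h5 (by omega)
  | case2 l r i h1 h2 ch fc h3 lc ih =>
    intro h4 h5 h6
    rw [pvScanB, dif_pos h1, dif_pos h2, dif_neg h3]
    have hch : xs[i] ∈ xs := List.getElem_mem h2
    have hcl := hLR i h2 (by omega) (by omega)
    have hlc : lc = pvLN xs xs[i] := hl _ hch
    refine ih h4 ?_ (by omega)
    split <;> omega
  | case3 l r i h1 h2 =>
    intro h4 h5 h6
    rw [pvScanB, dif_pos h1, dif_neg h2]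
    exact ⟨h4, h5⟩
  | case4 l r i h1 =>
    intro h4 h5 h6
    rw [pvScanB, dif_neg h1]
    exact ⟨h4, h5⟩

lemma pvScanB_closed (xs : List Char) (fd ld : PySem.Dict Char Nat)
    (hf : ∀ c ∈ xs, fd.getD c 0 = pvFN xs c) (hl : ∀ c ∈ xs, ld.getD c 0 = pvLN xs c) :
    ∀ l r i, l ≤ i → i ≤ r + 1 → r < xs.length →
      (∀ j (hj : j < xs.length), l ≤ j → j < i → l ≤ pvFN xs xs[j] ∧ pvLN xs xs[j] ≤ r) →
      pvClosed xs (pvScanB xs fd ld l r i).2 (pvScanB xs fd ld l r i).1 ∧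
        (pvScanB xs fd ld l r i).2 ≤ l ∧ r ≤ (pvScanB xs fd ld l r i).1 ∧
        (pvScanB xs fd ld l r i).1 < xs.length := by
  intro l r i
  induction l, r, i using pvScanB.induct xs fd ld with
  | case1 l r i h1 h2 ch fc h3 ih =>
    intro h4 h5 h6 hhist
    rw [pvScanB, dif_pos h1, dif_pos h2, dif_pos h3]
    have hch : xs[i] ∈ xs := List.getElem_mem h2
    have hfc : fc = pvFN xs xs[i] := hf _ hch
    obtain ⟨a, b, c, d⟩ := ih le_rfl (by omega) h6 (by omega)
    exact ⟨a, le_of_lt (lt_of_le_of_lt b h3), c, d⟩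
  | case2 l r i h1 h2 ch fc h3 lc ih =>
    intro h4 h5 h6 hhist
    rw [pvScanB, dif_pos h1, dif_pos h2, dif_neg h3]
    have hch : xs[i] ∈ xs := List.getElem_mem h2
    have hfc : fc = pvFN xs xs[i] := hf _ hch
    have hlc : lc = pvLN xs xs[i] := hl _ hch
    obtain ⟨hLN, _, _⟩ := pvLN_spec xs xs[i] hch
    have hstep : ∀ j (hj : j < xs.length), l ≤ j → j < i + 1 →
        l ≤ pvFN xs xs[j] ∧ pvLN xs xs[j] ≤ (if r < lc then lc else r) := ?_
    case _ =>
      obtain ⟨a, b, c, d⟩ := ih (by omega) (by split <;> omega) (by split <;> omega) hstep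
      exact ⟨a, b, le_trans (by split <;> omega) c, d⟩
    intro j hj hlj hji
    rcases Nat.lt_or_ge j i with hc | hc
    · obtain ⟨ha, hb⟩ := hhist j hj hlj hc
      constructor
      · exact ha
      · split <;> omega
    · have hji' : j = i := by omega
      subst hji'
      constructor
      · omega
      · split <;> omega
  | case3 l r i h1 h2 =>
    intro h4 h5 h6 hhist
    omega
  | case4 l r i h1 =>
    intro h4 h5 h6 hhist
    rw [pvScanB, dif_neg h1]
    have hi : i = r + 1 := by omega
    refine ⟨?_, le_rfl, le_rfl, h6⟩
    intro j hj hlj hjr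
    exact hhist j hj hlj (by omega)

lemma pvScanB_good (xs : List Char) (fd ld : PySem.Dict Char Nat)
    (hf : ∀ c ∈ xs, fd.getD c 0 = pvFN xs c) (hl : ∀ c ∈ xs, ld.getD c 0 = pvLN xs c)
    (c : Char) (hc : c ∈ xs) :
    pvGood xs c (pvScanB xs fd ld (pvFN xs c) (pvLN xs c) (pvFN xs c)) ∧
      (pvScanB xs fd ld (pvFN xs c) (pvLN xs c) (pvFN xs c)).1 < xs.length := by
  obtain ⟨hLNlt, _, _⟩ := pvLN_spec xs c hc
  have hfl := pvFN_le_pvLN xs c hc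
  obtain ⟨hcl, hle, hge, hlt⟩ := pvScanB_closed xs fd ld hf hl (pvFN xs c) (pvLN xs c)
    (pvFN xs c) le_rfl (by omega) hLNlt (by omega)
  refine ⟨⟨hle, hge, hcl, ?_⟩, hlt⟩
  intro L R hLR hLf hLr
  exact pvScanB_mono xs fd ld hf hl L R hLR _ _ _ hLf hLr le_rfl

lemma pvCloseA_step (xs : List Char) (d : PySem.Dict Char (Int × Int)) (hQ : pvQ xs d)
    (v : Nat × Nat) (hvc : pvClosed xs v.2 v.1) (hvr : v.1 < xs.length)
    (l r : Int) (hvl : (v.2 : Int) ≤ l) (hlr : l ≤ r) (hrv : r ≤ (v.1 : Int)) :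
    (v.2 : Int) ≤ pvWinMin xs d l r ∧ pvWinMin xs d l r ≤ l ∧
      r ≤ pvWinMax xs d (pvWinMin xs d l r) r ∧ pvWinMax xs d (pvWinMin xs d l r) r ≤ (v.1 : Int) ∧
      (pvWinMin xs d l r = l ∧ pvWinMax xs d (pvWinMin xs d l r) r = r →
        pvClosed xs l.toNat r.toNat) := by
  have hl0 : 0 ≤ l := by omega
  have hrn : r < (xs.length : Int) := by omega
  -- facts about all chars of the window [l, r]
  have hwin : ∀ ch ∈ PySem.Set.ofList (PySem.List.slice xs (some l) (some (r + 1))),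
      ∃ lc rc : Nat, d.getD ch (0, 0) = ((rc : Int), (lc : Int)) ∧
        (v.2 : Int) ≤ (lc : Int) ∧ (lc : Int) ≤ (pvFN xs ch : Int) ∧
        (pvLN xs ch : Int) ≤ (rc : Int) ∧ (rc : Int) ≤ (v.1 : Int) := by
    intro ch hch
    obtain ⟨j, hj, hlj, hjr, he⟩ := (pvWin_mem xs l r hl0 hlr ch).mp hch
    have hmem : ch ∈ xs := he ▸ List.getElem_mem hj
    obtain ⟨lc, rc, hd, hlf, hrl, hmin⟩ := hQ ch hmem
    obtain ⟨hvj1, hvj2⟩ := hvc j hj (by omega) (by omega)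
    rw [he] at hvj1 hvj2
    obtain ⟨hv2, hv1⟩ := hmin v.2 v.1 hvc hvj1 hvj2
    exact ⟨lc, rc, hd, by omega, by omega, by omega, by omega⟩
  -- the minimum
  set win := PySem.Set.ofList (PySem.List.slice xs (some l) (some (r + 1))) with hwdef
  have hlmem : xs[l.toNat]'(by omega) ∈ win := by
    rw [hwdef, pvWin_mem xs l r hl0 hlr]
    exact ⟨l.toNat, by omega, by omega, by omega, rfl⟩
  obtain ⟨m, hm⟩ : ∃ m, PySem.List.min? (win.map (fun c => (d.getD c (0, 0)).2)) (fun x => x) = some m := by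
    cases h : PySem.List.min? (win.map (fun c => (d.getD c (0, 0)).2)) (fun x => x) with
    | none =>
      rw [PySem.List.min?_eq_none_iff] at h
      exact absurd (List.mem_map_of_mem hlmem (f := fun c => (d.getD c (0, 0)).2)) (by simp [h])
    | some m => exact ⟨m, rfl⟩
  have hmin_le : ∀ y ∈ win.map (fun c => (d.getD c (0, 0)).2), m ≤ y := PySem.List.min?_isMin hm
  have hmmem := PySem.List.min?_mem hm
  have hWinMin : pvWinMin xs d l r = m := by rw [pvWinMin, ← hwdef, hm, Option.getD_some]
  -- m ≥ v.2 :
  have hmlow : (v.2 : Int) ≤ m := by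
    obtain ⟨ch, hch, hche⟩ := List.mem_map.mp hmmem
    obtain ⟨lc, rc, hd, ha, _, _, _⟩ := hwin ch hch
    rw [← hche, hd]
    exact ha
  -- m ≤ l :
  have hmle : m ≤ l := by
    obtain ⟨lc, rc, hd, _, hb, _, _⟩ := hwin _ hlmem
    have := hmin_le _ (List.mem_map_of_mem hlmem (f := fun c => (d.getD c (0, 0)).2))
    simp only [hd] at this
    have hfn : pvFN xs (xs[l.toNat]'(by omega)) ≤ l.toNat := by
      obtain ⟨_, _, hmn⟩ := pvFN_spec xs _ (List.getElem_mem (by omega : l.toNat < xs.length))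
      exact hmn l.toNat (by omega) rfl
    omega
  -- the maximum over the (possibly extended) window [m, r]
  have hm0 : 0 ≤ m := by omega
  have hmr : m ≤ r := by omega
  have hwin2 : ∀ ch ∈ PySem.Set.ofList (PySem.List.slice xs (some m) (some (r + 1))),
      ∃ lc rc : Nat, d.getD ch (0, 0) = ((rc : Int), (lc : Int)) ∧
        (v.2 : Int) ≤ (lc : Int) ∧ (lc : Int) ≤ (pvFN xs ch : Int) ∧
        (pvLN xs ch : Int) ≤ (rc : Int) ∧ (rc : Int) ≤ (v.1 : Int) := by
    intro ch hch
    obtain ⟨j, hj, hlj, hjr, he⟩ := (pvWin_mem xs m r hm0 hmr ch).mp hch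
    have hmem : ch ∈ xs := he ▸ List.getElem_mem hj
    obtain ⟨lc, rc, hd, hlf, hrl, hmin⟩ := hQ ch hmem
    obtain ⟨hvj1, hvj2⟩ := hvc j hj (by omega) (by omega)
    rw [he] at hvj1 hvj2
    obtain ⟨hv2, hv1⟩ := hmin v.2 v.1 hvc hvj1 hvj2
    exact ⟨lc, rc, hd, by omega, by omega, by omega, by omega⟩
  set win2 := PySem.Set.ofList (PySem.List.slice xs (some m) (some (r + 1))) with hw2def
  have hrmem : xs[r.toNat]'(by omega) ∈ win2 := by
    rw [hw2def, pvWin_mem xs m r hm0 hmr]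
    exact ⟨r.toNat, by omega, by omega, by omega, rfl⟩
  obtain ⟨M, hM⟩ : ∃ M, PySem.List.max? (win2.map (fun c => (d.getD c (0, 0)).1)) (fun x => x) = some M := by
    cases h : PySem.List.max? (win2.map (fun c => (d.getD c (0, 0)).1)) (fun x => x) with
    | none =>
      rw [PySem.List.max?_eq_none_iff] at h
      exact absurd (List.mem_map_of_mem hrmem (f := fun c => (d.getD c (0, 0)).1)) (by simp [h])
    | some M => exact ⟨M, rfl⟩
  have hmax_ge : ∀ y ∈ win2.map (fun c => (d.getD c (0, 0)).1), y ≤ M := PySem.List.max?_isMax hM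
  have hMmem := PySem.List.max?_mem hM
  have hWinMax : pvWinMax xs d m r = M := by rw [pvWinMax, ← hw2def, hM, Option.getD_some]
  rw [hWinMin, hWinMax]
  have hMhigh : M ≤ (v.1 : Int) := by
    obtain ⟨ch, hch, hche⟩ := List.mem_map.mp hMmem
    obtain ⟨lc, rc, hd, _, _, _, hb⟩ := hwin2 ch hch
    rw [← hche]
    simp only [hd]
    exact hb
  have hMge : r ≤ M := by
    obtain ⟨lc, rc, hd, _, _, hb, _⟩ := hwin2 _ hrmem
    have := hmax_ge _ (List.mem_map_of_mem hrmem (f := fun c => (d.getD c (0, 0)).1))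
    simp only [hd] at this
    have hln : r.toNat ≤ pvLN xs (xs[r.toNat]'(by omega)) := by
      obtain ⟨_, _, hmx⟩ := pvLN_spec xs _ (List.getElem_mem (by omega : r.toNat < xs.length))
      exact hmx r.toNat (by omega) rfl
    omega
  refine ⟨hmlow, hmle, hMge, hMhigh, ?_⟩
  rintro ⟨hEq, hEq2⟩
  intro j hj hlj hjr
  have hchw : xs[j] ∈ win := by
    rw [hwdef, pvWin_mem xs l r hl0 hlr]
    exact ⟨j, hj, by omega, by omega, rfl⟩
  have hchw2 : xs[j] ∈ win2 := by
    rw [hw2def, pvWin_mem xs m r hm0 hmr]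
    exact ⟨j, hj, by omega, by omega, rfl⟩
  obtain ⟨lc, rc, hd, _, hlcf, hlnr, _⟩ := hwin _ hchw
  have h1 := hmin_le _ (List.mem_map_of_mem hchw (f := fun c => (d.getD c (0, 0)).2))
  have h2 := hmax_ge _ (List.mem_map_of_mem hchw2 (f := fun c => (d.getD c (0, 0)).1))
  simp only [hd] at h1 h2
  constructor
  · omega
  · omega

lemma pvCloseA_fix (xs : List Char) (d : PySem.Dict Char (Int × Int)) (hQ : pvQ xs d)
    (c : Char) (hc : c ∈ xs) (v : Nat × Nat) (hv : pvGood xs c v) (hvr : v.1 < xs.length) :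
    ∀ (fuel : Nat) (l r l_ r_ : Int), (v.2 : Int) ≤ l → l ≤ (pvFN xs c : Int) →
      (pvLN xs c : Int) ≤ r → r ≤ (v.1 : Int) → (r_ ≠ r ∨ l_ ≠ l) →
      ((l - v.2) + ((v.1 : Int) - r) + 2 ≤ (fuel : Int)) →
      pvCloseA xs d fuel r l r_ l_ = ((v.1 : Int), (v.2 : Int)) := by
  intro fuel
  induction fuel with
  | zero => intro l r l_ r_ h1 h2 h3 h4 h5 h6; exfalso; push_cast at h6; omega
  | succ fuel ih =>
    intro l r l_ r_ h1 h2 h3 h4 h5 h6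
    have hfl := pvFN_le_pvLN xs c hc
    have hlr : l ≤ r := by omega
    obtain ⟨s1, s2, s3, s4, s5⟩ := pvCloseA_step xs d hQ v hv.2.2.1 hvr l r h1 hlr h4
    rw [pvCloseA, if_pos (by tauto)]
    show pvCloseA xs d fuel (pvWinMax xs d (pvWinMin xs d l r) r) (pvWinMin xs d l r) r l
      = ((v.1 : Int), (v.2 : Int))
    by_cases hsame : pvWinMin xs d l r = l ∧ pvWinMax xs d (pvWinMin xs d l r) r = r
    · have hclosed := s5 hsame
      obtain ⟨m1, m2⟩ := hv.2.2.2 l.toNat r.toNat hclosed (by omega) (by omega)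
      have hl : l = (v.2 : Int) := by omega
      have hr : r = (v.1 : Int) := by omega
      obtain ⟨hq1, hq2⟩ := hsame
      rw [hq2, hq1]
      cases fuel with
      | zero => exfalso; push_cast at h6; omega
      | succ fuel' =>
        rw [pvCloseA, if_neg (by simp)]
        rw [hl, hr]
    · refine ih (pvWinMin xs d l r) (pvWinMax xs d (pvWinMin xs d l r) r) l r
        s1 (by omega) (by omega) s4 ?_ ?_
      · by_contra hcon
        push Not at hcon
        exact hsame ⟨hcon.2.symm, hcon.1.symm⟩
      · push_cast at h6 ⊢
        rcases not_and_or.mp hsame with h | h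
        · have : pvWinMin xs d l r < l := lt_of_le_of_ne s2 h
          omega
        · have : r < pvWinMax xs d (pvWinMin xs d l r) r := lt_of_le_of_ne s3 (fun he => h he.symm)
          omega

lemma pvCast_first (xs : List Char) (c : Char) (_hc : c ∈ xs) :
    pvFirstIdx xs c = (pvFN xs c : Int) := rfl

lemma pvCast_last (xs : List Char) (c : Char) (hc : c ∈ xs) :
    pvLastIdx xs c = (pvLN xs c : Int) := by
  have hcr : c ∈ xs.reverse := by simpa using hc
  obtain ⟨k, hk⟩ := Option.isSome_iff_exists.mp ((PySem.List.index?_isSome_iff _ c).mpr hcr)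
  obtain ⟨hlt, -, -⟩ := PySem.List.getElem_of_index?_eq_some hk
  rw [List.length_reverse] at hlt
  rw [pvLastIdx, pvLN, hk]
  simp only [Option.getD_some]
  omega

lemma pvDic0_items (xs : List Char) :
    ((PySem.Set.ofList xs).foldl
        (fun d c => d.insert c (pvLastIdx xs c, pvFirstIdx xs c)) PySem.Dict.empty).items
      = (PySem.Set.ofList xs).map (fun c => (c, (pvLastIdx xs c, pvFirstIdx xs c))) := by
  rw [PySem.Dict.items_foldl_insert_fresh (k := fun c => c)]
  · rfl
  · intro a _; exact PySem.Dict.contains_empty a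
  · simp only [List.map_id_fun', id]
    exact PySem.Set.nodup_ofList xs

lemma pvDic0_keys (xs : List Char) :
    ((PySem.Set.ofList xs).foldl
        (fun d c => d.insert c (pvLastIdx xs c, pvFirstIdx xs c)) PySem.Dict.empty).keys
      = PySem.Set.ofList xs := by
  show (((PySem.Set.ofList xs).foldl
      (fun d c => d.insert c (pvLastIdx xs c, pvFirstIdx xs c)) PySem.Dict.empty).items).map (·.1)
      = _
  rw [pvDic0_items]
  rw [List.map_map]
  exact List.map_id _

lemma pvDic0_getD (xs : List Char) (c : Char) (hc : c ∈ xs) :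
    ((PySem.Set.ofList xs).foldl
        (fun d c => d.insert c (pvLastIdx xs c, pvFirstIdx xs c)) PySem.Dict.empty).getD c (0, 0)
      = (pvLastIdx xs c, pvFirstIdx xs c) := by
  apply PySem.Dict.getD_of_mem_items
  · rw [pvDic0_items]
    exact List.mem_map_of_mem (by simpa using hc)
  · rw [pvDic0_keys]
    exact PySem.Set.nodup_ofList xs

def pvFL (xs : List Char) : PySem.Dict Char Nat × PySem.Dict Char Nat :=
  xs.zipIdx.foldl
    (fun (p : PySem.Dict Char Nat × PySem.Dict Char Nat) ci =>
      ((if p.1.contains ci.1 then p.1 else p.1.insert ci.1 ci.2), p.2.insert ci.1 ci.2))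
    (PySem.Dict.empty, PySem.Dict.empty)

lemma pvFL_append (xs : List Char) (a : Char) :
    pvFL (xs ++ [a]) =
      ((if (pvFL xs).1.contains a then (pvFL xs).1 else (pvFL xs).1.insert a xs.length),
        (pvFL xs).2.insert a xs.length) := by
  rw [pvFL, show (xs ++ [a]).zipIdx = xs.zipIdx ++ [(a, xs.length)] by simp [List.zipIdx_append],
    List.foldl_append]
  rfl

lemma pvFN_append_mem (xs : List Char) (a c : Char) (hc : c ∈ xs) :
    pvFN (xs ++ [a]) c = pvFN xs c := by
  rw [pvFN, pvFN, PySem.List.index?_append_of_mem _ hc]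

lemma pvFN_append_self (xs : List Char) (a : Char) (ha : a ∉ xs) :
    pvFN (xs ++ [a]) a = xs.length := by
  rw [pvFN, PySem.List.index?_append_singleton_self xs a ha]
  rfl

lemma pvLN_append_self (xs : List Char) (a : Char) :
    pvLN (xs ++ [a]) a = xs.length := by
  rw [pvLN, List.reverse_append]
  simp only [List.reverse_singleton, List.singleton_append, PySem.List.index?_cons_self,
    Option.getD_some, List.length_append, List.length_singleton]
  omega

lemma pvLN_append_ne (xs : List Char) (a c : Char) (hne : c ≠ a) (hc : c ∈ xs) :
    pvLN (xs ++ [a]) c = pvLN xs c := by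
  have hcr : c ∈ xs.reverse := by simpa using hc
  obtain ⟨k, hk⟩ := Option.isSome_iff_exists.mp ((PySem.List.index?_isSome_iff _ c).mpr hcr)
  obtain ⟨hlt, -, -⟩ := PySem.List.getElem_of_index?_eq_some hk
  rw [List.length_reverse] at hlt
  rw [pvLN, pvLN, List.reverse_append]
  simp only [List.reverse_singleton, List.singleton_append,
    PySem.List.index?_cons_of_ne xs.reverse (Ne.symm hne), hk, Option.map_some,
    Option.getD_some, List.length_append, List.length_singleton]
  omega

lemma pvFL_spec (xs : List Char) :
    (pvFL xs).1.keys = PySem.Set.ofList xs ∧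
    ∀ c ∈ xs, (pvFL xs).1.getD c 0 = pvFN xs c ∧ (pvFL xs).2.getD c 0 = pvLN xs c := by
  induction xs using List.reverseRecOn with
  | nil => exact ⟨rfl, by simp⟩
  | append_singleton xs a ih =>
    obtain ⟨ihk, ihv⟩ := ih
    rw [pvFL_append]
    by_cases hca : (pvFL xs).1.contains a
    · have haxs : a ∈ xs := by
        rw [← PySem.Set.mem_ofList (xs := xs), ← ihk]
        exact (PySem.Dict.contains_iff_mem_keys _ _).mp hca
      constructor
      · simp only [if_pos hca, ihk, PySem.Set.ofList_append_singleton,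
          PySem.Set.add_of_mem ((PySem.Set.mem_ofList _ _).mpr haxs)]
      · intro c hc
        simp only [if_pos hca]
        by_cases hcae : c = a
        · subst hcae
          rw [pvFN_append_mem xs c c haxs, PySem.Dict.getD_insert]
          refine ⟨(ihv c haxs).1, ?_⟩
          simp [pvLN_append_self]
        · have hcxs : c ∈ xs := by
            rcases List.mem_append.mp hc with h | h
            · exact h
            · simp at h; exact absurd h hcae
          rw [pvFN_append_mem xs a c hcxs, PySem.Dict.getD_insert, if_neg hcae,
            pvLN_append_ne xs a c hcae hcxs]
          exact ihv c hcxs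
    · have haxs : a ∉ xs := by
        intro h
        exact hca ((PySem.Dict.contains_iff_mem_keys _ _).mpr (ihk ▸ (PySem.Set.mem_ofList _ _).mpr h))
      constructor
      · simp only [if_neg hca, PySem.Dict.keys_insert_of_not_contains _ _ ((Bool.not_eq_true _).mp hca), ihk,
          PySem.Set.ofList_append_singleton,
          PySem.Set.add_of_not_mem (fun h => haxs ((PySem.Set.mem_ofList _ _).mp h))]
      · intro c hc
        simp only [if_neg hca]
        by_cases hcae : c = a
        · subst hcae
          rw [PySem.Dict.getD_insert, if_pos rfl, PySem.Dict.getD_insert, if_pos rfl,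
            pvFN_append_self xs c haxs, pvLN_append_self]
          exact ⟨rfl, rfl⟩
        · have hcxs : c ∈ xs := by
            rcases List.mem_append.mp hc with h | h
            · exact h
            · simp at h; exact absurd h hcae
          rw [PySem.Dict.getD_insert, if_neg hcae, PySem.Dict.getD_insert, if_neg hcae,
            pvFN_append_mem xs a c hcxs, pvLN_append_ne xs a c hcae hcxs]
          exact ihv c hcxs

lemma pvFoldA (xs : List Char) (v : Char → Nat × Nat) (hv : ∀ c ∈ xs, pvGood xs c (v c))
    (hvr : ∀ c ∈ xs, (v c).1 < xs.length) :
    ∀ ks : List Char, (∀ c ∈ ks, c ∈ xs) → ks.Nodup →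
      ∀ d : PySem.Dict Char (Int × Int), pvQ xs d →
      (∀ c ∈ ks, (ks.foldl (fun d ch =>
          let rl := d.getD ch (0, 0)
          d.insert ch (pvCloseA xs d (2 * xs.length + 4) rl.1 rl.2 (-1) (-1))) d).getD c (0, 0)
        = (((v c).1 : Int), ((v c).2 : Int))) ∧
      (∀ c, c ∉ ks → (ks.foldl (fun d ch =>
          let rl := d.getD ch (0, 0)
          d.insert ch (pvCloseA xs d (2 * xs.length + 4) rl.1 rl.2 (-1) (-1))) d).getD c (0, 0)
        = d.getD c (0, 0)) := by
  intro ks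
  induction ks with
  | nil => intro _ _ d hQ; exact ⟨by simp, fun c _ => rfl⟩
  | cons ch ks' ih =>
    intro hmem hnd d hQ
    have hch : ch ∈ xs := hmem ch List.mem_cons_self
    obtain ⟨lc, rc, hd, hlf, hrl, hmin⟩ := hQ ch hch
    obtain ⟨hFNlt, -, -⟩ := pvFN_spec xs ch hch
    obtain ⟨hLNlt, -, -⟩ := pvLN_spec xs ch hch
    obtain ⟨hg1, hg2, hg3, hg4⟩ := hv ch hch
    obtain ⟨hb1, hb2⟩ := hmin (v ch).2 (v ch).1 hg3 hg1 hg2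
    have hclose : pvCloseA xs d (2 * xs.length + 4) (d.getD ch (0, 0)).1 (d.getD ch (0, 0)).2
        (-1) (-1) = (((v ch).1 : Int), ((v ch).2 : Int)) := by
      rw [hd]
      show pvCloseA xs d (2 * xs.length + 4) (rc : Int) (lc : Int) (-1) (-1) = _
      have hvb := hvr ch hch
      exact pvCloseA_fix xs d hQ ch hch (v ch) (hv ch hch) (hvr ch hch) _ _ _ _ _
        (by exact_mod_cast hb1) (by exact_mod_cast hlf) (by exact_mod_cast hrl)
        (by exact_mod_cast hb2) (by left; omega) (by push_cast; omega)
    have hd1 : (d.insert ch (pvCloseA xs d (2 * xs.length + 4) (d.getD ch (0, 0)).1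
        (d.getD ch (0, 0)).2 (-1) (-1))).getD ch (0, 0) = (((v ch).1 : Int), ((v ch).2 : Int)) := by
      rw [PySem.Dict.getD_insert, if_pos rfl, hclose]
    have hQ1 : pvQ xs (d.insert ch (pvCloseA xs d (2 * xs.length + 4) (d.getD ch (0, 0)).1
        (d.getD ch (0, 0)).2 (-1) (-1))) := by
      intro c hc
      by_cases hce : c = ch
      · subst hce
        exact ⟨(v c).2, (v c).1, hd1, hg1, hg2, fun L R hC h1 h2 => hg4 L R hC h1 h2⟩
      · obtain ⟨lc', rc', hd', h1', h2', h3'⟩ := hQ c hc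
        exact ⟨lc', rc', by rw [PySem.Dict.getD_insert, if_neg hce]; exact hd', h1', h2', h3'⟩
    obtain ⟨ihA, ihB⟩ := ih (fun c hc => hmem c (List.mem_cons_of_mem _ hc))
      (List.Nodup.of_cons hnd) _ hQ1
    simp only [List.foldl_cons]
    constructor
    · intro c hc
      rcases List.mem_cons.mp hc with hce | hce
      · subst hce
        have hnot : c ∉ ks' := by
          have := List.Nodup.notMem hnd
          exact this
        rw [ihB c hnot, hd1]
      · exact ihA c hce
    · intro c hc
      rw [ihB c (fun h => hc (List.mem_cons_of_mem _ h))]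
      rw [PySem.Dict.getD_insert, if_neg (fun h => hc (by rw [h]; exact List.mem_cons_self))]


lemma pvSet_update_self (ks : List Char) : ∀ s : PySem.Set Char, (∀ c ∈ ks, c ∈ s) →
    PySem.Set.update s ks = s := by
  induction ks with
  | nil => intro s _; rfl
  | cons k ks ih =>
    intro s hks
    rw [PySem.Set.update_cons, PySem.Set.add_of_mem (hks k List.mem_cons_self)]
    exact ih s (fun c hc => hks c (List.mem_cons_of_mem _ hc))

lemma pvValsEq (xs : List Char) :
    (((PySem.Set.ofList xs).foldl
        (fun d c => d.insert c (pvLastIdx xs c, pvFirstIdx xs c)) PySem.Dict.empty).keys.foldl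
      (fun d ch =>
        let rl := d.getD ch (0, 0)
        d.insert ch (pvCloseA xs d (2 * xs.length + 4) rl.1 rl.2 (-1) (-1)))
      ((PySem.Set.ofList xs).foldl
        (fun d c => d.insert c (pvLastIdx xs c, pvFirstIdx xs c)) PySem.Dict.empty)).values
    = (pvFL xs).1.keys.map (fun c =>
        let p := pvScanB xs (pvFL xs).1 (pvFL xs).2 ((pvFL xs).1.getD c 0) ((pvFL xs).2.getD c 0)
          ((pvFL xs).1.getD c 0)
        ((p.1 : Int), (p.2 : Int))) := by
  have hfl := pvFL_spec xs
  have hf : ∀ c ∈ xs, (pvFL xs).1.getD c 0 = pvFN xs c := fun c hc => (hfl.2 c hc).1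
  have hl : ∀ c ∈ xs, (pvFL xs).2.getD c 0 = pvLN xs c := fun c hc => (hfl.2 c hc).2
  have hv : ∀ c ∈ xs, pvGood xs c
      (pvScanB xs (pvFL xs).1 (pvFL xs).2 (pvFN xs c) (pvLN xs c) (pvFN xs c)) :=
    fun c hc => (pvScanB_good xs _ _ hf hl c hc).1
  have hvr : ∀ c ∈ xs, (pvScanB xs (pvFL xs).1 (pvFL xs).2
      (pvFN xs c) (pvLN xs c) (pvFN xs c)).1 < xs.length :=
    fun c hc => (pvScanB_good xs _ _ hf hl c hc).2
  set d0 := (PySem.Set.ofList xs).foldl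
      (fun d c => d.insert c (pvLastIdx xs c, pvFirstIdx xs c)) PySem.Dict.empty with hd0
  have hkeys0 : d0.keys = PySem.Set.ofList xs := pvDic0_keys xs
  have hmem0 : ∀ c ∈ d0.keys, c ∈ xs := by
    rw [hkeys0]; intro c hc; exact (PySem.Set.mem_ofList _ _).mp hc
  have hnd0 : d0.keys.Nodup := by rw [hkeys0]; exact PySem.Set.nodup_ofList xs
  have hQ0 : pvQ xs d0 := by
    intro c hc
    refine ⟨pvFN xs c, pvLN xs c, ?_, le_rfl, le_rfl, fun L R _ h1 h2 => ⟨h1, h2⟩⟩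
    rw [hd0, pvDic0_getD xs c hc, pvCast_first xs c hc, pvCast_last xs c hc]
  obtain ⟨hA, -⟩ := pvFoldA xs
    (fun c => pvScanB xs (pvFL xs).1 (pvFL xs).2 (pvFN xs c) (pvLN xs c) (pvFN xs c))
    hv hvr d0.keys hmem0 hnd0 d0 hQ0
  set dic := d0.keys.foldl
      (fun d ch =>
        let rl := d.getD ch (0, 0)
        d.insert ch (pvCloseA xs d (2 * xs.length + 4) rl.1 rl.2 (-1) (-1))) d0 with hdic
  have hdkeys : dic.keys = d0.keys := by
    have := PySem.Dict.keys_foldl_insert d0.keys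
      (fun d ch => pvCloseA xs d (2 * xs.length + 4) (d.getD ch (0, 0)).1 (d.getD ch (0, 0)).2
        (-1) (-1)) d0
    rw [hdic]
    exact this.trans (by rw [hkeys0]; exact pvSet_update_self _ _ (by
      intro c hc
      rw [hkeys0] at hmem0
      exact (PySem.Set.mem_ofList _ _).mpr (hmem0 c hc)))
  have hndk : dic.keys.Nodup := by rw [hdkeys]; exact hnd0
  rw [PySem.Dict.values_eq_map_keys dic hndk (0, 0), hdkeys, hkeys0, hfl.1]
  apply List.map_congr_left
  intro c hc
  have hcxs : c ∈ xs := (PySem.Set.mem_ofList _ _).mp hc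
  have hck : c ∈ d0.keys := by rw [hkeys0]; exact hc
  rw [hA c hck, hf c hcxs, hl c hcxs]

lemma pvMain (s : String) : maxNumOfSubstrings s = maxNumOfSubstrings_alt s := by
  rw [maxNumOfSubstrings, maxNumOfSubstrings_alt]
  have hfl := pvFL_spec s.toList
  have hf : ∀ c ∈ s.toList, (pvFL s.toList).1.getD c 0 = pvFN s.toList c :=
    fun c hc => (hfl.2 c hc).1
  have hl : ∀ c ∈ s.toList, (pvFL s.toList).2.getD c 0 = pvLN s.toList c :=
    fun c hc => (hfl.2 c hc).2
  have hv : ∀ c ∈ s.toList, pvGood s.toList c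
      (pvScanB s.toList (pvFL s.toList).1 (pvFL s.toList).2 (pvFN s.toList c) (pvLN s.toList c)
        (pvFN s.toList c)) :=
    fun c hc => (pvScanB_good s.toList _ _ hf hl c hc).1
  have hvr : ∀ c ∈ s.toList, (pvScanB s.toList (pvFL s.toList).1 (pvFL s.toList).2
      (pvFN s.toList c) (pvLN s.toList c) (pvFN s.toList c)).1 < s.toList.length :=
    fun c hc => (pvScanB_good s.toList _ _ hf hl c hc).2
  refine congrArg (fun L : List (Int × Int) =>
    ((PySem.List.sorted2 L (fun p => p.1) (fun p => p.2)).foldl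
      (fun (acc : Int × List String) rl =>
        (rl.1, if rl.2 ≥ acc.1 then
            acc.2 ++ [String.ofList (PySem.List.slice s.toList (some rl.2) (some (rl.1 + 1)))]
          else acc.2)) ((0 : Int), ([] : List String))).2) ?_
  exact pvValsEq s.toList

-- ===== VERDICT (by name: the statement is the Claim_ definition above) =====
theorem maxNumOfSubstrings_spec : Claim_equal_maxNumOfSubstrings := by
  intro s _
  exact pvMain s
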